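-- pv_equiv track=rewrite | github.com/vmware/ansible-for-nsxt | library/nsxt_transport_nodes.py | id_exist_in_list_dict_obj
-- ===== SOURCE A (Python) =====
-- def id_exist_in_list_dict_obj(key, list_obj1, list_obj2):
--     all_id_presents = False
--     if len(list_obj1) != len(list_obj2):
--         return all_id_presents
--     for dict_obj1 in list_obj1:
--         if dict_obj1.__contains__(key):
--             for dict_obj2 in list_obj2:
--                 if dict_obj2.__contains__(key) and dict_obj1[key] == dict_obj2[key]:
--                     all_id_presents = True
--                     continue
--             if not all_id_presents:
--                 return False
--     return True
-- ===== SOURCE B (Python) =====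
-- _SENTINEL = object()
--
-- def id_exist_in_list_dict_obj(key, list_obj1, list_obj2):
--     if len(list_obj1) != len(list_obj2):
--         return False
--     target = next((d[key] for d in list_obj1 if key in d), _SENTINEL)
--     if target is _SENTINEL:
--         return True
--     return any(key in d and d[key] == target for d in list_obj2)
-- ===== Notes on version B (the rewrite author's own statement) =====
-- stated objective: simpler
-- what changed: Replaces A's flag-latched nested loop (whose latch means only the first keyed dict ever decides) with a two-phase computation: find the first keyed value in list1, then a single any() membership test over list2.
import Mathlib
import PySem

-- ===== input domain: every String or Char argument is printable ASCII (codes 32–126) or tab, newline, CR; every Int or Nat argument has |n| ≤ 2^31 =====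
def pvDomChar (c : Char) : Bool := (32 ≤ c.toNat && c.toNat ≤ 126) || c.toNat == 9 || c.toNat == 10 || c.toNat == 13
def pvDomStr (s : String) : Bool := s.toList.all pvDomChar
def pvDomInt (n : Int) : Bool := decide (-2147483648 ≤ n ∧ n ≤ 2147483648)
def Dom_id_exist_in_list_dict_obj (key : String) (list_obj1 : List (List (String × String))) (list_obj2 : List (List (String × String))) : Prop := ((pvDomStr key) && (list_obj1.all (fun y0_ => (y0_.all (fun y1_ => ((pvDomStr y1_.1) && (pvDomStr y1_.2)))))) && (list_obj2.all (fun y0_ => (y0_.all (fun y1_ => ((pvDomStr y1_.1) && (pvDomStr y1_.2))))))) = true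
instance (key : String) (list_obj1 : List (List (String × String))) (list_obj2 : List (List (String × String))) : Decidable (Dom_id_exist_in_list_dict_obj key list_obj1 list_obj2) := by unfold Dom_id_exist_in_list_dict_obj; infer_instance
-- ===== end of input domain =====

-- B replaces A's flag-latched nested loops with a two-phase "find the first keyed value, then one membership pass" (simpler).

-- shared dict primitive: first-match lookup in an insertion-order association list
-- ('key in d' is (keyGet? key d).isSome; 'd[key]' is its value — both ports use it as their dict access)
def keyGet? (key : String) (d : List (String × String)) : Option String :=
  (d.find? (fun p => p.1 == key)).map (·.2)

-- ===== PORT A =====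
-- the loop body over list_obj1, carrying the (never reset) all_id_presents flag;
-- 'dict_obj2.__contains__(key) and dict_obj1[key] == dict_obj2[key]' is keyGet? key d2 == some v1
def goA (key : String) (list2 : List (List (String × String))) :
    List (List (String × String)) → Bool → Bool
  | [], _ => true
  | d1 :: rest, flag =>
    match keyGet? key d1 with
    | some v1 =>
      let flag' := list2.foldl (fun f d2 => if keyGet? key d2 == some v1 then true else f) flag
      if flag' = false then false else goA key list2 rest flag'
    | none => goA key list2 rest flag

def id_exist_in_list_dict_obj (key : String) (list_obj1 : List (List (String × String))) (list_obj2 : List (List (String × String))) : Bool :=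
  if list_obj1.length ≠ list_obj2.length then false
  else goA key list_obj2 list_obj1 false

-- ===== PORT B =====
def id_exist_in_list_dict_obj_alt (key : String) (list_obj1 : List (List (String × String))) (list_obj2 : List (List (String × String))) : Bool :=
  if list_obj1.length ≠ list_obj2.length then false
  else
    match list_obj1.findSome? (keyGet? key) with   -- next((d[key] for d in list_obj1 if key in d), SENTINEL)
    | none => true                                  -- target is SENTINEL
    | some v => list_obj2.any (fun d => keyGet? key d == some v)

-- ===== PRECONDITION & SPEC =====
def Spec_id_exist_in_list_dict_obj (key : String) (list_obj1 : List (List (String × String))) (list_obj2 : List (List (String × String))) (out : Bool) : Prop := out = id_exist_in_list_dict_obj_alt key list_obj1 list_obj2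
instance (key : String) (list_obj1 : List (List (String × String))) (list_obj2 : List (List (String × String))) (out : Bool) : Decidable (Spec_id_exist_in_list_dict_obj key list_obj1 list_obj2 out) := by unfold Spec_id_exist_in_list_dict_obj; infer_instance

-- ===== CLAIM (what is proved, stated in full; the proofs are below) =====
def Claim_equal_id_exist_in_list_dict_obj : Prop := ∀ (key : String) (list_obj1 : List (List (String × String))) (list_obj2 : List (List (String × String))), Dom_id_exist_in_list_dict_obj key list_obj1 list_obj2 → Spec_id_exist_in_list_dict_obj key list_obj1 list_obj2 (id_exist_in_list_dict_obj key list_obj1 list_obj2)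

-- ===== LEMMAS AND PROOFS =====

-- A's inner loop is an or-latch: it computes flag || any
theorem foldl_latch (c : List (String × String) → Bool) (b : Bool)
    (l : List (List (String × String))) :
    l.foldl (fun f d => if c d then true else f) b = (b || l.any c) := by
  induction l generalizing b with
  | nil => simp
  | cons d t ih =>
    simp only [List.foldl_cons, List.any_cons, ih]
    by_cases h : c d = true <;> simp [h]

-- once the flag is true, A's outer loop returns true
theorem goA_true (key : String) (l2 l1 : List (List (String × String))) :
    goA key l2 l1 true = true := by
  induction l1 with
  | nil => rfl
  | cons d1 rest ih =>
    simp only [goA]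
    cases h : keyGet? key d1 with
    | none => exact ih
    | some v1 =>
      simp only [foldl_latch, Bool.true_or]
      simpa using ih

theorem goA_false (key : String) (l2 l1 : List (List (String × String))) :
    goA key l2 l1 false =
      (match l1.findSome? (keyGet? key) with
       | none => true
       | some v => l2.any (fun d => keyGet? key d == some v)) := by
  induction l1 with
  | nil => rfl
  | cons d1 rest ih =>
    simp only [goA, List.findSome?_cons]
    cases h : keyGet? key d1 with
    | none => exact ih
    | some v1 =>
      simp only [foldl_latch, Bool.false_or]
      cases ha : l2.any (fun d => keyGet? key d == some v1) with
      | false => simp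
      | true => simp [goA_true]

-- ===== VERDICT (by name: the statement is the Claim_ definition above) =====
theorem id_exist_in_list_dict_obj_spec : Claim_equal_id_exist_in_list_dict_obj := by
  intro key l1 l2 _
  unfold Spec_id_exist_in_list_dict_obj id_exist_in_list_dict_obj id_exist_in_list_dict_obj_alt
  split_ifs with h
  · rfl
  · exact goA_false key l2 l1
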